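-- pv_equiv track=rewrite | github.com/Vicchio/palmetto_bin | removalposcar.py | edit_atom_count
-- ===== SOURCE A (Python) =====
-- def edit_atom_count(atoms_dict, remove_atoms_dict):
-- 	edit_atom_dict = {}
-- 	for key in atoms_dict.keys():
-- 		if key in remove_atoms_dict.keys():
-- 			edit_atom_dict[key] = atoms_dict[key] - int(len(remove_atoms_dict[key]))
-- 		else:
-- 			edit_atom_dict[key] = atoms_dict[key]
-- 	return edit_atom_dict
-- ===== SOURCE B (Python) =====
-- def edit_atom_count(atoms_dict, remove_atoms_dict):
--     # Stage 1: flatten both dicts into one stream of (key, delta) events;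
--     # removal keys absent from atoms_dict are dropped here.
--     deltas = list(atoms_dict.items()) + [
--         (key, -int(len(value)))
--         for key, value in remove_atoms_dict.items()
--         if key in atoms_dict
--     ]
--     # Stage 2: aggregate the event stream by key.
--     edit_atom_dict = {}
--     for key, d in deltas:
--         edit_atom_dict[key] = edit_atom_dict.get(key, 0) + d
--     return edit_atom_dict
-- ===== Notes on version B (the rewrite author's own statement) =====
-- stated objective: alternative
-- what changed: B is a two-stage pipeline: it first flattens both dicts into one (key, delta) event stream (positive counts from atoms_dict, negative removal lengths for keys also present in atoms_dict), then aggregates the stream by key with get(key,0)+delta, instead of A's single keyed loop with a membership branch per atom.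
import Mathlib
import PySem

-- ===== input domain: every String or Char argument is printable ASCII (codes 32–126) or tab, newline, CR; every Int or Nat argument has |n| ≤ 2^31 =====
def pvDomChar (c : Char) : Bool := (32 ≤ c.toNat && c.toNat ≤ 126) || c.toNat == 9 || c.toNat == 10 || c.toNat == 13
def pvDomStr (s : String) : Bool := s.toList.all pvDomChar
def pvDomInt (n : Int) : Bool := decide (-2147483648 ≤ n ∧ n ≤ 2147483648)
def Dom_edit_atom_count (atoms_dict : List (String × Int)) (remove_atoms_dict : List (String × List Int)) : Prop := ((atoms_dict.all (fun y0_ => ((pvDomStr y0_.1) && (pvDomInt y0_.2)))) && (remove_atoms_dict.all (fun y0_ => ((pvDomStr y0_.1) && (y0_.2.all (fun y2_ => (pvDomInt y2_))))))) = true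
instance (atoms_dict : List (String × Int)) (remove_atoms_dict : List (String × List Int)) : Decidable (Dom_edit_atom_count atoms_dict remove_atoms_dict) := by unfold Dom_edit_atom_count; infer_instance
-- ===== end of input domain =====

-- B flattens both dicts into one (key, delta) event stream and then aggregates it by key; same result, a different (staged) decomposition.

-- ===== PORT A =====
-- first-match lookup on an association list = Python dict lookup (key is always present where A uses it)
def pvLookA (atoms_dict : List (String × Int)) (k : String) : Int :=
  ((atoms_dict.find? (fun q => q.1 == k)).map Prod.snd).getD 0

def pvLookR (remove_atoms_dict : List (String × List Int)) (k : String) : List Int :=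
  ((remove_atoms_dict.find? (fun q => q.1 == k)).map Prod.snd).getD []

def edit_atom_count (atoms_dict : List (String × Int)) (remove_atoms_dict : List (String × List Int)) : List (String × Int) :=
  -- edit_atom_dict = {}; for key in atoms_dict.keys(): if key in remove_atoms_dict.keys(): … else: …
  (atoms_dict.foldl (fun (e : PySem.Dict String Int) p =>
      if (remove_atoms_dict.map Prod.fst).contains p.1 then
        e.insert p.1 (pvLookA atoms_dict p.1 - ((pvLookR remove_atoms_dict p.1).length : Int))
      else
        e.insert p.1 (pvLookA atoms_dict p.1))
    PySem.Dict.empty).items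

-- ===== PORT B =====
def edit_atom_count_alt (atoms_dict : List (String × Int)) (remove_atoms_dict : List (String × List Int)) : List (String × Int) :=
  -- deltas = list(atoms_dict.items()) + [(k, -len(v)) for k, v in remove_atoms_dict.items() if k in atoms_dict]
  let deltas : List (String × Int) :=
    atoms_dict ++
      ((remove_atoms_dict.filter (fun p => (atoms_dict.map Prod.fst).contains p.1)).map
        (fun p => (p.1, -(p.2.length : Int))))
  -- edit_atom_dict = {}; for key, d in deltas: edit_atom_dict[key] = edit_atom_dict.get(key, 0) + d
  (deltas.foldl (fun (e : PySem.Dict String Int) p => e.modify p.1 0 (fun v => v + p.2))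
    PySem.Dict.empty).items

-- ===== PRECONDITION & SPEC =====
-- Pre_ requires unique keys in both association lists: the parameters represent Python dicts,
-- in which duplicate keys are unrepresentable, so no input A actually receives is excluded.
def Pre_edit_atom_count (atoms_dict : List (String × Int)) (remove_atoms_dict : List (String × List Int)) : Prop :=
  (atoms_dict.map Prod.fst).Nodup ∧ (remove_atoms_dict.map Prod.fst).Nodup
instance (atoms_dict : List (String × Int)) (remove_atoms_dict : List (String × List Int)) : Decidable (Pre_edit_atom_count atoms_dict remove_atoms_dict) := by unfold Pre_edit_atom_count; infer_instance

def pvWitness_edit_atom_count : (List (String × Int)) × (List (String × List Int)) :=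
  ([("H", 4), ("O", 2)], [("H", [1, 2]), ("C", [3])])

def Spec_edit_atom_count (atoms_dict : List (String × Int)) (remove_atoms_dict : List (String × List Int)) (out : List (String × Int)) : Prop := out = edit_atom_count_alt atoms_dict remove_atoms_dict
instance (atoms_dict : List (String × Int)) (remove_atoms_dict : List (String × List Int)) (out : List (String × Int)) : Decidable (Spec_edit_atom_count atoms_dict remove_atoms_dict out) := by unfold Spec_edit_atom_count; infer_instance

-- ===== CLAIM (what is proved, stated in full; the proofs are below) =====
def Claim_equal_edit_atom_count : Prop := ∀ (atoms_dict : List (String × Int)) (remove_atoms_dict : List (String × List Int)), Dom_edit_atom_count atoms_dict remove_atoms_dict → Pre_edit_atom_count atoms_dict remove_atoms_dict → Spec_edit_atom_count atoms_dict remove_atoms_dict (edit_atom_count atoms_dict remove_atoms_dict)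

-- ===== LEMMAS AND PROOFS =====

theorem pv_find_self {β : Type} (l : List (String × β)) (a : String × β)
    (hnd : (l.map Prod.fst).Nodup) (hm : a ∈ l) :
    l.find? (fun q => q.1 == a.1) = some a := by
  induction l with
  | nil => cases hm
  | cons p t ih =>
    simp only [List.map_cons, List.nodup_cons] at hnd
    rcases List.mem_cons.mp hm with h | h
    · subst h; rw [List.find?_cons_of_pos (by simp)]
    · have hne : p.1 ≠ a.1 := by
        intro heq; exact hnd.1 (heq ▸ (List.mem_map.mpr ⟨a, h, rfl⟩))
      rw [List.find?_cons_of_neg (by simp [hne]), ih hnd.2 h]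

theorem pv_find_none {β : Type} (l : List (String × β)) (x : String)
    (hx : x ∉ l.map Prod.fst) :
    l.find? (fun q => q.1 == x) = none := by
  rw [List.find?_eq_none]
  intro a ha
  simp only [beq_iff_eq]
  intro h; exact hx (List.mem_map.mpr ⟨a, ha, h⟩)

-- B's aggregation loop: getD after the fold = getD before + the (first-match) delta of x in the stream
theorem pvAgg_getD (l : List (String × Int)) (d : PySem.Dict String Int) (x : String)
    (hnd : (l.map Prod.fst).Nodup) :
    (l.foldl (fun (e : PySem.Dict String Int) p => e.modify p.1 0 (fun v => v + p.2)) d).getD x 0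
      = d.getD x 0 + ((l.find? (fun q => q.1 == x)).map Prod.snd).getD 0 := by
  induction l generalizing d with
  | nil => simp
  | cons p t ih =>
    simp only [List.map_cons, List.nodup_cons] at hnd
    simp only [List.foldl_cons]
    rw [ih _ hnd.2]
    by_cases hx : p.1 = x
    · subst hx
      have ht : t.find? (fun q => q.1 == p.1) = none := pv_find_none t p.1 hnd.1
      have hp : (p :: t).find? (fun q => q.1 == p.1) = some p := by simp [List.find?]
      rw [ht, hp, PySem.Dict.getD_modify_self]
      simp
    · have hh : (p :: t).find? (fun q => q.1 == x) = t.find? (fun q => q.1 == x) :=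
        List.find?_cons_of_neg (by simp [hx])
      rw [hh, PySem.Dict.getD_modify_of_ne _ _ _ (Ne.symm hx)]

-- keys of B's fold: first occurrences appended in order
theorem pvAgg_keys (l : List (String × Int)) (d : PySem.Dict String Int) :
    (l.foldl (fun (e : PySem.Dict String Int) p => e.modify p.1 0 (fun v => v + p.2)) d).keys
      = PySem.Set.update d.keys (l.map Prod.fst) := by
  exact PySem.Dict.keys_foldl_modify_key l Prod.fst 0 (fun _ p => fun v => v + p.2) d

theorem pv_set_update_fresh (l s : List String) (hnd : l.Nodup) (hdisj : ∀ x ∈ l, x ∉ s) :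
    PySem.Set.update s l = s ++ l := by
  induction l generalizing s with
  | nil => simp [PySem.Set.update]
  | cons a t ih =>
    simp only [List.nodup_cons] at hnd
    have ha : PySem.Set.add s a = s ++ [a] := by
      simp [PySem.Set.add, PySem.Set.contains, hdisj a (by simp)]
    have hstep : PySem.Set.update s (a :: t) = PySem.Set.update (PySem.Set.add s a) t := rfl
    rw [hstep, ha, ih (s ++ [a]) hnd.2 (by
      intro x hx
      simp only [List.mem_append, List.mem_singleton]
      rintro (h | h)
      · exact hdisj x (by simp [hx]) h
      · exact hnd.1 (h ▸ hx))]
    simp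

theorem pv_set_update_subset (l s : List String) (hsub : ∀ x ∈ l, x ∈ s) :
    PySem.Set.update s l = s := by
  induction l with
  | nil => rfl
  | cons a t ih =>
    have ha : PySem.Set.add s a = s := by
      simp [PySem.Set.add, PySem.Set.contains, hsub a (by simp)]
    have : PySem.Set.update s (a :: t) = PySem.Set.update (PySem.Set.add s a) t := rfl
    rw [this, ha]
    exact ih (fun x hx => hsub x (by simp [hx]))

-- A's result item by item
theorem pvA_items (atoms_dict : List (String × Int)) (rem : List (String × List Int))
    (h : (atoms_dict.map Prod.fst).Nodup) :
    edit_atom_count atoms_dict rem = atoms_dict.map (fun a =>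
      (a.1, if (rem.map Prod.fst).contains a.1 then
              pvLookA atoms_dict a.1 - ((pvLookR rem a.1).length : Int)
            else pvLookA atoms_dict a.1)) := by
  unfold edit_atom_count
  have hfun : (fun (e : PySem.Dict String Int) (p : String × Int) =>
      if (rem.map Prod.fst).contains p.1 then
        e.insert p.1 (pvLookA atoms_dict p.1 - ((pvLookR rem p.1).length : Int))
      else
        e.insert p.1 (pvLookA atoms_dict p.1)) =
      (fun (e : PySem.Dict String Int) (p : String × Int) =>
        e.insert p.1 (if (rem.map Prod.fst).contains p.1 then
            pvLookA atoms_dict p.1 - ((pvLookR rem p.1).length : Int)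
          else pvLookA atoms_dict p.1)) := by
    funext e p; split <;> rfl
  rw [hfun]
  have := PySem.Dict.items_foldl_insert_fresh (l := atoms_dict) (k := Prod.fst)
    (v := fun p => if (rem.map Prod.fst).contains p.1 then
        pvLookA atoms_dict p.1 - ((pvLookR rem p.1).length : Int)
      else pvLookA atoms_dict p.1)
    (d := PySem.Dict.empty) (by simp) h
  simpa using this

-- ===== VERDICT (by name: the statement is the Claim_ definition above) =====
theorem edit_atom_count_spec : Claim_equal_edit_atom_count := by
  intro atoms rem _ hpre
  obtain ⟨ha, hr⟩ := hpre
  unfold Spec_edit_atom_count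
  rw [pvA_items atoms rem ha]
  unfold edit_atom_count_alt
  set extras : List (String × Int) :=
    ((rem.filter (fun p => (atoms.map Prod.fst).contains p.1)).map
      (fun p => (p.1, -(p.2.length : Int)))) with hextras
  have hextkeys : extras.map Prod.fst = (rem.filter (fun p => (atoms.map Prod.fst).contains p.1)).map Prod.fst := by
    rw [hextras, List.map_map]; rfl
  have hextnd : (extras.map Prod.fst).Nodup := by
    rw [hextkeys]
    exact hr.sublist (List.Sublist.map Prod.fst List.filter_sublist)
  have hextsub : ∀ x ∈ extras.map Prod.fst, x ∈ atoms.map Prod.fst := by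
    rw [hextkeys]
    intro x hx
    obtain ⟨q, hq, hq1⟩ := List.mem_map.mp hx
    have := List.of_mem_filter hq
    rw [← hq1]
    exact List.contains_iff_mem.mp this
  set F := ((atoms ++ extras).foldl (fun (e : PySem.Dict String Int) p => e.modify p.1 0 (fun v => v + p.2)) PySem.Dict.empty) with hF
  have hkeys : F.keys = atoms.map Prod.fst := by
    rw [hF, pvAgg_keys, List.map_append]
    have : PySem.Set.update (PySem.Dict.empty : PySem.Dict String Int).keys (atoms.map Prod.fst ++ extras.map Prod.fst)
        = PySem.Set.update (PySem.Set.update (PySem.Dict.empty : PySem.Dict String Int).keys (atoms.map Prod.fst)) (extras.map Prod.fst) := by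
      simp [PySem.Set.update, List.foldl_append]
    rw [this]
    have h1 : PySem.Set.update (PySem.Dict.empty : PySem.Dict String Int).keys (atoms.map Prod.fst) = atoms.map Prod.fst := by
      have : (PySem.Dict.empty : PySem.Dict String Int).keys = [] := rfl
      rw [this, pv_set_update_fresh _ _ ha (by simp)]
      simp
    rw [h1, pv_set_update_subset _ _ hextsub]
  have hknd : F.keys.Nodup := by rw [hkeys]; exact ha
  have hsplit : F = extras.foldl (fun (e : PySem.Dict String Int) p => e.modify p.1 0 (fun v => v + p.2))
      (atoms.foldl (fun (e : PySem.Dict String Int) p => e.modify p.1 0 (fun v => v + p.2)) PySem.Dict.empty) := by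
    rw [hF, List.foldl_append]
  rw [PySem.Dict.items_eq_map_keys F hknd 0, hkeys, List.map_map]
  apply List.map_congr_left
  intro a hmem
  have hfindA : atoms.find? (fun q => q.1 == a.1) = some a := pv_find_self atoms a ha hmem
  have hgF : F.getD a.1 0 = a.2 + ((extras.find? (fun q => q.1 == a.1)).map Prod.snd).getD 0 := by
    rw [hsplit, pvAgg_getD _ _ _ hextnd, pvAgg_getD _ _ _ ha, hfindA]
    simp
  simp only [Function.comp_apply, hgF]
  have hlookA : pvLookA atoms a.1 = a.2 := by simp [pvLookA, hfindA]
  by_cases hcr : (rem.map Prod.fst).contains a.1 = true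
  · rw [if_pos hcr]
    rw [List.contains_iff_mem] at hcr
    obtain ⟨q, hq, hq1⟩ := List.mem_map.mp hcr
    have hcontA : (atoms.map Prod.fst).contains q.1 = true := by
      rw [List.contains_iff_mem, hq1]
      exact List.mem_map.mpr ⟨a, hmem, rfl⟩
    have hqfilt : q ∈ rem.filter (fun p => (atoms.map Prod.fst).contains p.1) :=
      List.mem_filter.mpr ⟨hq, hcontA⟩
    have hqx : ((a.1, -(q.2.length : Int)) : String × Int) ∈ extras := by
      rw [hextras]
      exact List.mem_map.mpr ⟨q, hqfilt, by rw [hq1]⟩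
    have hfindE : extras.find? (fun p => p.1 == a.1) = some (a.1, -(q.2.length : Int)) :=
      pv_find_self extras (a.1, -(q.2.length : Int)) hextnd hqx
    have hfq : rem.find? (fun p => p.1 == a.1) = some q := by
      rw [← hq1]; exact pv_find_self rem q hr hq
    rw [hfindE]
    simp [pvLookR, hfq, hlookA]
    ring
  · rw [if_neg hcr]
    have hfindE : extras.find? (fun p => p.1 == a.1) = none := by
      apply pv_find_none
      intro hmem'
      have : a.1 ∈ rem.map Prod.fst := by
        rw [hextkeys] at hmem'
        obtain ⟨q, hq, hq1⟩ := List.mem_map.mp hmem'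
        exact hq1 ▸ List.mem_map.mpr ⟨q, List.mem_of_mem_filter hq, rfl⟩
      exact hcr (List.contains_iff_mem.mpr this)
    rw [hfindE]
    simp [hlookA]
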